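-- pv_equiv track=rewrite | github.com/yukiyuqichen/His-Psy | utils/text_similarity.py | deduplicate_texts
-- ===== SOURCE A (Python) =====
-- def deduplicate_texts(texts, labels):
--     text_dict = {}
--     duplicate_text = []
--     for i in range(len(texts)):
--         label = labels[i]
--         text = texts[i]
--         if text in text_dict:
--             # Delete words with multiple labels
--             duplicate_text.append(text)
--             del text_dict[text]
--         elif text in duplicate_text:
--             continue
--         else:
--             text_dict[text] = label
--     return list(text_dict.keys()), list(text_dict.values())
-- ===== SOURCE B (Python) =====
-- def deduplicate_texts(texts, labels):
--     counts = {}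
--     for t in texts:
--         counts[t] = counts.get(t, 0) + 1
--     kept = [(t, l) for t, l in zip(texts, labels) if counts[t] == 1]
--     return [t for t, _ in kept], [l for _, l in kept]
-- ===== Notes on version B (the rewrite author's own statement) =====
-- stated objective: simpler
-- what changed: Replaces A's single-pass dict-with-deletions plus a duplicate-tracking side list (scanned linearly on each repeat) by two passes: count occurrences of each text once, then keep exactly the (text, label) pairs whose text occurs once.
import Mathlib
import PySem

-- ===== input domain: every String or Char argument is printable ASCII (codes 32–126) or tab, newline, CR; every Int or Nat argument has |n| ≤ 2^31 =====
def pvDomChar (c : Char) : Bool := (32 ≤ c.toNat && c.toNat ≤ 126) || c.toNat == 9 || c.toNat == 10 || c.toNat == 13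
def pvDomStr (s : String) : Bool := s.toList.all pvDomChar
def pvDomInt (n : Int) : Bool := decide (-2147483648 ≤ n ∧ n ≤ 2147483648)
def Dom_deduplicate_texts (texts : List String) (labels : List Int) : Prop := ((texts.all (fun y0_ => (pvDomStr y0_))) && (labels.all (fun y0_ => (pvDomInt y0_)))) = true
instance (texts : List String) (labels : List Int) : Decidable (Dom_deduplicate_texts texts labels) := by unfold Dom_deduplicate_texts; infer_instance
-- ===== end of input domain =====

-- B replaces A's single-pass dict-with-deletions by "count all texts once, then keep the pairs
-- whose text occurs exactly once" (objective: simpler).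


-- ===== PORT A =====
-- the loop body of A over the single running state (text_dict, duplicate_text)
def dedupStepA (st : PySem.Dict String Int × List String) (text : String) (label : Int) :
    PySem.Dict String Int × List String :=
  if st.1.contains text then (st.1.erase text, st.2 ++ [text])
  else if st.2.contains text then st
  else (st.1.insert text label, st.2)

def deduplicate_texts (texts : List String) (labels : List Int) : List String × List Int :=
  -- for i in range(len(texts)): label = labels[i]; text = texts[i]; …
  -- labels[i]/texts[i] raise IndexError out of range; Pre_ keeps every index in range,
  -- so the total stand-in pyGetD is exact on Pre_.
  let st := (PySem.List.pyRange 0 (texts.length : Int) 1).foldl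
    (fun st i => dedupStepA st (PySem.List.pyGetD texts i "") (PySem.List.pyGetD labels i 0))
    (PySem.Dict.empty, [])
  (st.1.keys, st.1.values)

-- ===== PORT B =====
def deduplicate_texts_alt (texts : List String) (labels : List Int) : List String × List Int :=
  let counts := texts.foldl (fun (c : PySem.Dict String Int) t => c.insert t (c.getD t 0 + 1)) PySem.Dict.empty
  let kept := (texts.zip labels).filter (fun p => counts.getD p.1 0 == 1)
  (kept.map Prod.fst, kept.map Prod.snd)

-- ===== PRECONDITION & SPEC =====
-- Pre_ excludes exactly the inputs where A raises IndexError (labels shorter than texts).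
def Pre_deduplicate_texts (texts : List String) (labels : List Int) : Prop :=
  texts.length ≤ labels.length
instance (texts : List String) (labels : List Int) : Decidable (Pre_deduplicate_texts texts labels) := by unfold Pre_deduplicate_texts; infer_instance

def pvWitness_deduplicate_texts : List String × List Int := (["a", "b", "a", "c"], [1, 2, 3, 4])

def Spec_deduplicate_texts (texts : List String) (labels : List Int) (out : List String × List Int) : Prop := out = deduplicate_texts_alt texts labels
instance (texts : List String) (labels : List Int) (out : List String × List Int) : Decidable (Spec_deduplicate_texts texts labels out) := by unfold Spec_deduplicate_texts; infer_instance

-- ===== CLAIM (what is proved, stated in full; the proofs are below) =====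
def Claim_equal_deduplicate_texts : Prop := ∀ (texts : List String) (labels : List Int), Dom_deduplicate_texts texts labels → Pre_deduplicate_texts texts labels → Spec_deduplicate_texts texts labels (deduplicate_texts texts labels)

-- ===== LEMMAS AND PROOFS =====

-- A's index loop over two parallel lists is the fold over their zip (all indexing in range).
lemma foldl_range_two {σ : Type} (f : σ → String → Int → σ) :
    ∀ (n : Nat) (ts : List String) (ls : List Int), n ≤ ts.length → ts.length ≤ ls.length →
    ∀ (init : σ),
      (List.range n).foldl (fun st k => f st (ts.getD k "") (ls.getD k 0)) init
        = ((ts.take n).zip (ls.take n)).foldl (fun st p => f st p.1 p.2) init := by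
  intro n
  induction n with
  | zero => intro ts ls _ _ init; simp
  | succ n ih =>
    intro ts ls hn hl init
    have hn' : n ≤ ts.length := by omega
    have hts : n < ts.length := by omega
    have hls : n < ls.length := by omega
    rw [List.range_succ, List.foldl_append, ih ts ls hn' hl]
    rw [List.take_add_one, List.take_add_one,
        List.zip_append (by simp [List.length_take]; omega)]
    simp [List.getElem?_eq_getElem hts, List.getElem?_eq_getElem hls,
      List.getD_eq_getElem?_getD, List.foldl_append]

-- membership in A's dict ↔ the text occurred exactly once so far
lemma contains_of_items_filter (d : PySem.Dict String Int) (P : List (String × Int)) (t : String)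
    (hd : d.items = P.filter (fun p => (P.map Prod.fst).count p.1 == 1)) :
    d.contains t = true ↔ (P.map Prod.fst).count t = 1 := by
  rw [PySem.Dict.contains_iff_mem_keys]
  show t ∈ d.items.map Prod.fst ↔ _
  rw [hd]
  constructor
  · rintro h
    simp only [List.mem_map, List.mem_filter] at h
    obtain ⟨p, ⟨_, hc⟩, hp⟩ := h
    subst hp
    simpa using hc
  · intro hc
    have ht : t ∈ P.map Prod.fst := by
      rw [← List.count_pos_iff]; omega
    simp only [List.mem_map] at ht
    obtain ⟨p, hp, hfst⟩ := ht
    subst hfst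
    exact List.mem_map_of_mem (List.mem_filter.mpr ⟨hp, by simpa using hc⟩)

-- count in a singleton list
lemma count_single (s t : String) : List.count s [t] = if s = t then 1 else 0 := by
  by_cases h : s = t
  · simp [h]
  · simp [List.count_cons, h]
    exact fun h' => absurd h'.symm h

-- main invariant for A's loop: after processing prefix P, the dict holds exactly the pairs
-- whose text occurs exactly once in the part processed so far
lemma loopA_invariant :
    ∀ (rest P : List (String × Int)) (d : PySem.Dict String Int) (dup : List String),
      d.keys.Nodup →
      d.items = P.filter (fun p => (P.map Prod.fst).count p.1 == 1) →
      (∀ s, s ∈ dup ↔ 2 ≤ (P.map Prod.fst).count s) →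
      (rest.foldl (fun st p => dedupStepA st p.1 p.2) (d, dup)).1.items
        = (P ++ rest).filter (fun p => ((P ++ rest).map Prod.fst).count p.1 == 1) := by
  intro rest
  induction rest with
  | nil => intro P d dup _ hd _; simpa using hd
  | cons q rest' ih =>
    obtain ⟨t, l⟩ := q
    intro P d dup hnd hd hdup
    have hPE : P ++ (t, l) :: rest' = (P ++ [(t, l)]) ++ rest' := by simp
    have hmapE : (P ++ [(t, l)]).map Prod.fst = P.map Prod.fst ++ [t] := by simp
    rw [List.foldl_cons, hPE]
    have hcont := contains_of_items_filter d P t hd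
    by_cases hc1 : d.contains t = true
    · -- text in text_dict: its count so far is 1; delete it, record the duplicate
      have hcnt : (P.map Prod.fst).count t = 1 := hcont.mp hc1
      have hstep : dedupStepA (d, dup) (t, l).1 (t, l).2 = (d.erase t, dup ++ [t]) := by
        simp [dedupStepA, hc1]
      rw [hstep]
      apply ih
      · exact hnd.sublist (List.Sublist.map Prod.fst List.filter_sublist)
      · have e1 : (d.erase t).items = d.items.filter (fun p => !(p.1 == t)) := rfl
        rw [e1, hd, List.filter_filter, List.filter_append]
        have e2 : [(t, l)].filter
            (fun p => ((P ++ [(t, l)]).map Prod.fst).count p.1 == 1) = [] := by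
          simp [hmapE, List.count_append, count_single, hcnt]
        rw [e2, List.append_nil]
        apply List.filter_congr
        intro p hp
        by_cases hpt : p.1 = t
        · simp [hmapE, List.count_append, hpt, hcnt]
        · simp [hmapE, List.count_append, count_single, hpt]
      · intro s
        rw [hmapE, List.count_append, count_single, List.mem_append, List.mem_singleton]
        by_cases hst : s = t
        · simp [hst, hcnt]
        · simp only [if_neg hst, Nat.add_zero]
          constructor
          · rintro (h | h)
            · exact (hdup s).mp h
            · exact absurd h hst
          · intro h; exact Or.inl ((hdup s).mpr h)
    · by_cases hc2 : dup.contains t = true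
      · -- text in duplicate_text: its count so far is ≥ 2; skip
        have hm : t ∈ dup := List.contains_iff_mem.mp hc2
        have hge : 2 ≤ (P.map Prod.fst).count t := (hdup t).mp hm
        have hstep : dedupStepA (d, dup) (t, l).1 (t, l).2 = (d, dup) := by
          simp [dedupStepA, hc1, hm]
        rw [hstep]
        apply ih
        · exact hnd
        · rw [hd, List.filter_append]
          have e2 : [(t, l)].filter
              (fun p => ((P ++ [(t, l)]).map Prod.fst).count p.1 == 1) = [] := by
            simp only [hmapE, List.count_append, count_single, List.filter_cons,
              List.filter_nil]
            rw [if_neg]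
            simp only [beq_iff_eq]
            omega
          rw [e2, List.append_nil]
          apply List.filter_congr
          intro p hp
          by_cases hpt : p.1 = t
          · simp only [hmapE, List.count_append, count_single, hpt]
            rw [Bool.eq_iff_iff]
            simp only [beq_iff_eq]
            omega
          · simp [hmapE, List.count_append, count_single, hpt]
        · intro s
          rw [hmapE, List.count_append, count_single]
          by_cases hst : s = t
          · subst hst
            rw [if_pos rfl]
            constructor
            · intro _; omega
            · intro _; exact hm
          · simp only [if_neg hst, Nat.add_zero]
            exact hdup s
      · -- fresh text: its count so far is 0; insert it
        have hnm : t ∉ dup := fun h => hc2 (List.contains_iff_mem.mpr h)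
        have hc1' : d.contains t = false := by
          cases h : d.contains t
          · rfl
          · exact absurd h hc1
        have hcnt0 : (P.map Prod.fst).count t = 0 := by
          have h1 : (P.map Prod.fst).count t ≠ 1 := fun h => hc1 (hcont.mpr h)
          have h2 : ¬ 2 ≤ (P.map Prod.fst).count t := fun h => hnm ((hdup t).mpr h)
          omega
        have hstep : dedupStepA (d, dup) (t, l).1 (t, l).2 = (d.insert t l, dup) := by
          simp [dedupStepA, hc1, hnm]
        rw [hstep]
        apply ih
        · exact PySem.Dict.nodup_keys_insert d t l hnd
        · rw [PySem.Dict.items_insert_of_not_contains d l hc1', hd, List.filter_append]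
          have e2 : [(t, l)].filter
              (fun p => ((P ++ [(t, l)]).map Prod.fst).count p.1 == 1) = [(t, l)] := by
            simp [hmapE, List.count_append, count_single, hcnt0]
          rw [e2]
          congr 1
          apply List.filter_congr
          intro p hp
          have hpt : p.1 ≠ t := by
            intro h
            have : t ∈ P.map Prod.fst := h ▸ List.mem_map_of_mem hp
            rw [← List.count_pos_iff] at this
            omega
          simp [hmapE, List.count_append, count_single, hpt]
        · intro s
          rw [hmapE, List.count_append, count_single]
          by_cases hst : s = t
          · subst hst
            rw [if_pos rfl]
            constructor
            · intro h; exact absurd h hnm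
            · intro h; omega
          · simp only [if_neg hst, Nat.add_zero]
            exact hdup s

lemma zip_take_right : ∀ (ts : List String) (ls : List Int), ts.zip (ls.take ts.length) = ts.zip ls := by
  intro ts
  induction ts with
  | nil => intro ls; simp
  | cons t ts ih =>
    intro ls
    cases ls with
    | nil => simp
    | cons l ls => simp [ih ls]

-- ===== VERDICT (by name: the statement is the Claim_ definition above) =====
theorem deduplicate_texts_spec : Claim_equal_deduplicate_texts := by
  intro texts labels _ hpre
  unfold Pre_deduplicate_texts at hpre
  show deduplicate_texts texts labels = deduplicate_texts_alt texts labels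
  simp only [deduplicate_texts, deduplicate_texts_alt]
  rw [PySem.List.pyRange_zero_nat, List.foldl_map]
  simp only [PySem.List.pyGetD_natCast]
  rw [foldl_range_two dedupStepA texts.length texts labels (le_refl _) hpre]
  rw [List.take_length]
  rw [zip_take_right]
  have hinv := loopA_invariant (texts.zip labels) [] PySem.Dict.empty []
    (by simp [PySem.Dict.keys, PySem.Dict.empty]) (by rfl) (by simp)
  simp only [List.nil_append] at hinv
  rw [List.map_fst_zip hpre] at hinv
  rw [PySem.Dict.foldl_insert_getD_add_one_eq_counter]
  simp only [PySem.Dict.getD_counter]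
  have hfilter : (texts.zip labels).filter (fun p => texts.count p.1 == 1)
      = (texts.zip labels).filter (fun p => (texts.count p.1 : Int) == 1) := by
    apply List.filter_congr
    intro p _
    rw [Bool.eq_iff_iff]
    simp only [beq_iff_eq]
    omega
  rw [hfilter] at hinv
  have hk : ∀ (d : PySem.Dict String Int), d.keys = d.items.map Prod.fst := fun _ => rfl
  have hv : ∀ (d : PySem.Dict String Int), d.values = d.items.map Prod.snd := fun _ => rfl
  rw [hk, hv, hinv]
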